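-- pv_equiv track=rewrite | github.com/ValiantDominator/Coup_Thomas | practice_3/practice_3.py | steal
-- ===== SOURCE A (Python) =====
-- def steal(playerAData,playerBData):
--     ###player a steals from player b
--     ###returns the data of the 2 players
--     ###does not check for validity of the move
--     stealamount = 0
--     while (stealamount < 2) & ((playerBData)[2] > 0):
--         playerAData[2] += 1
--         playerBData[2] += -1
--         stealamount += 1
--     valid = True
--     if playerAData[2]<1 or playerBData[2]<1: ##spageti coad
--         valid = False
--     return [playerAData,playerBData,valid]
-- ===== SOURCE B (Python) =====
-- def steal(playerAData, playerBData):
--     # closed-form transfer: same in-place mutation of both lists as the loop performs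
--     amount = min(2, max(0, playerBData[2]))
--     playerAData[2] += amount
--     playerBData[2] -= amount
--     valid = not (playerAData[2] < 1 or playerBData[2] < 1)
--     return [playerAData, playerBData, valid]
-- ===== Notes on version B (the rewrite author's own statement) =====
-- stated objective: simpler
-- what changed: Replaces the bounded while-loop that moves one coin at a time with a closed-form clamp amount = min(2, max(0, coins)) applied in a single update to each list.
import Mathlib
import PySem

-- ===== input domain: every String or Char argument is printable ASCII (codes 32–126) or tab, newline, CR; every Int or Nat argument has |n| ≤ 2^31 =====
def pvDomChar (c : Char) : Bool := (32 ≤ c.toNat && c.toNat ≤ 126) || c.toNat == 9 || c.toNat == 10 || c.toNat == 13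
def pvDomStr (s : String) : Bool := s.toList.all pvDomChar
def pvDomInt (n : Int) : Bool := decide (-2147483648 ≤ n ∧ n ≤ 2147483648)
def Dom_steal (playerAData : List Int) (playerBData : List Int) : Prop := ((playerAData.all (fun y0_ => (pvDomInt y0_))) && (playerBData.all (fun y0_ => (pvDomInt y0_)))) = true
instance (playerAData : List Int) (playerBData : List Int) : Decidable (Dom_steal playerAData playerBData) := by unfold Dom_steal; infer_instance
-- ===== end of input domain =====

-- B replaces A's one-coin-at-a-time while-loop with a closed-form clamped transfer (same return value; both
-- Pythons mutate the two argument lists in place identically, the equivalence proved is about the return value).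


-- ===== PORT A =====
-- the while-loop: stealamount starts at 0 and the loop runs while stealamount < 2,
-- so fuel 2 - stealamount (as a Nat) is exact; each iteration moves one coin.
def stealLoop : Nat → List Int → List Int → List Int × List Int
  | 0, a, b => (a, b)
  | fuel + 1, a, b =>
    if PySem.List.pyGetD b 2 0 > 0 then
      stealLoop fuel (PySem.List.pySetD a 2 (PySem.List.pyGetD a 2 0 + 1))
                     (PySem.List.pySetD b 2 (PySem.List.pyGetD b 2 0 + (-1)))
    else (a, b)

def steal (playerAData : List Int) (playerBData : List Int) : List Int × List Int × Bool :=
  let (a, b) := stealLoop 2 playerAData playerBData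
  let valid := if PySem.List.pyGetD a 2 0 < 1 ∨ PySem.List.pyGetD b 2 0 < 1 then false else true
  (a, b, valid)

-- ===== PORT B =====
def steal_alt (playerAData : List Int) (playerBData : List Int) : List Int × List Int × Bool :=
  let amount := min 2 (max 0 (PySem.List.pyGetD playerBData 2 0))
  let a := PySem.List.pySetD playerAData 2 (PySem.List.pyGetD playerAData 2 0 + amount)
  let b := PySem.List.pySetD playerBData 2 (PySem.List.pyGetD playerBData 2 0 - amount)
  let valid := !(decide (PySem.List.pyGetD a 2 0 < 1) || decide (PySem.List.pyGetD b 2 0 < 1))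
  (a, b, valid)

-- ===== PRECONDITION & SPEC =====
-- A indexes both lists at position 2, so it raises IndexError unless both have length ≥ 3.
def Pre_steal (playerAData : List Int) (playerBData : List Int) : Prop :=
  3 ≤ playerAData.length ∧ 3 ≤ playerBData.length
instance (playerAData : List Int) (playerBData : List Int) : Decidable (Pre_steal playerAData playerBData) := by unfold Pre_steal; infer_instance
def pvWitness_steal : List Int × List Int := ([1, 0, 2], [0, 1, 3])

def Spec_steal (playerAData : List Int) (playerBData : List Int) (out : List Int × List Int × Bool) : Prop := out = steal_alt playerAData playerBData
instance (playerAData : List Int) (playerBData : List Int) (out : List Int × List Int × Bool) : Decidable (Spec_steal playerAData playerBData out) := by unfold Spec_steal; infer_instance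

-- ===== CLAIM (what is proved, stated in full; the proofs are below) =====
def Claim_equal_steal : Prop := ∀ (playerAData : List Int) (playerBData : List Int), Dom_steal playerAData playerBData → Pre_steal playerAData playerBData → Spec_steal playerAData playerBData (steal playerAData playerBData)

-- ===== LEMMAS AND PROOFS =====
theorem getD2 (x y z : Int) (r : List Int) : PySem.List.pyGetD (x :: y :: z :: r) 2 0 = z := by
  simp [pysem]

theorem setD2 (x y z v : Int) (r : List Int) : PySem.List.pySetD (x :: y :: z :: r) 2 v = x :: y :: v :: r := by
  simp [pysem, List.set]

-- ===== VERDICT (by name: the statement is the Claim_ definition above) =====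
theorem steal_spec : Claim_equal_steal := by
  intro a b _ hpre
  obtain ⟨ha, hb⟩ := hpre
  match a, b with
  | a0 :: a1 :: a2 :: ar, b0 :: b1 :: b2 :: br =>
    show steal _ _ = steal_alt _ _
    rcases lt_trichotomy b2 1 with h | h | h
    · -- b2 ≤ 0: the loop body never runs, amount = 0
      have hc : ¬ (0:Int) < b2 := by omega
      have hm : min 2 (max 0 b2) = 0 := by omega
      simp only [steal, steal_alt, stealLoop, getD2, setD2, hc, if_false, hm,
        Prod.mk.injEq, List.cons.injEq]
      and_intros <;>
        first
          | trivial
          | omega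
          | (split_ifs with hv <;> simp <;> omega)
    · -- b2 = 1: exactly one iteration
      subst h
      have hm : min 2 (max 0 (1:Int)) = 1 := by omega
      simp only [steal, steal_alt, stealLoop, getD2, setD2, hm, Prod.mk.injEq]
      norm_num [getD2]
    · -- b2 ≥ 2: two iterations, amount = 2
      have hc1 : (0:Int) < b2 := by omega
      have hc2 : (0:Int) < b2 + -1 := by omega
      have hm : min 2 (max 0 b2) = 2 := by omega
      simp only [steal, steal_alt, stealLoop, getD2, setD2, hc1, hc2, if_true, hm,
        Prod.mk.injEq, List.cons.injEq]
      and_intros <;>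
        first
          | trivial
          | omega
          | (split_ifs with hv <;> simp <;> omega)
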